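-- pv_equiv track=rewrite | github.com/dattark2005/Radiological-material-and-threat-detection-for-defense- | backend/services/threat_service.py | _determine_consensus_quantity
-- ===== SOURCE A (Python) =====
-- def _determine_consensus_quantity(quantities):
--     """Determine consensus material quantity."""
--     if not quantities:
--         return 'Small'
--
--     # Remove None values
--     valid_quantities = [q for q in quantities if q]
--
--     if not valid_quantities:
--         return 'Small'
--
--     # Return the largest quantity (most conservative approach)
--     quantity_order = {'Small': 1, 'Medium': 2, 'Large': 3}
--     max_quantity = max(valid_quantities, key=lambda x: quantity_order.get(x, 1))
--
--     return max_quantity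
-- ===== SOURCE B (Python) =====
-- def _determine_consensus_quantity(quantities):
--     """Determine consensus material quantity."""
--     if not quantities:
--         return 'Small'
--
--     valid_quantities = [q for q in quantities if q]
--
--     if not valid_quantities:
--         return 'Small'
--
--     # Dispatch by membership in descending priority; any label other than
--     # 'Medium'/'Large' ranks lowest, and max's leftmost-tie rule means the
--     # fallback is the first surviving element.
--     if 'Large' in valid_quantities:
--         return 'Large'
--     if 'Medium' in valid_quantities:
--         return 'Medium'
--     return valid_quantities[0]
-- ===== Notes on version B (the rewrite author's own statement) =====
-- stated objective: simpler
-- what changed: Replaced the keyed running-max scan over a priority dict by direct membership dispatch ('Large' in valid, then 'Medium', else the first surviving element).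
import Mathlib
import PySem

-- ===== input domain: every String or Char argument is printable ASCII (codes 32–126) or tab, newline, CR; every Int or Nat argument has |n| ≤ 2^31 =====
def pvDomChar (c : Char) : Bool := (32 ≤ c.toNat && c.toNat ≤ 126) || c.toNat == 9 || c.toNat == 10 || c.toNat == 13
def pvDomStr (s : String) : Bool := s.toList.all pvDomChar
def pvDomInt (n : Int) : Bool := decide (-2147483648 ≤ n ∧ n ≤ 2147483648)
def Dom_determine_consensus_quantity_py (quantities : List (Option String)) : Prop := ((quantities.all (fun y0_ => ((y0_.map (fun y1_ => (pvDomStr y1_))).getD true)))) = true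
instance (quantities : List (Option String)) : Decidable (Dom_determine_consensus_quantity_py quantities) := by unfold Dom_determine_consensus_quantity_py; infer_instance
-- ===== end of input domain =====

-- B replaces A's keyed running-max over a priority dict by membership dispatch
-- ('Large' first, then 'Medium', else the first surviving element): simpler.


-- ===== PORT A =====
-- '[q for q in quantities if q]': keeps the truthy elements (None and '' are falsy),
-- unwrapped to the underlying strings.
def pvValid (quantities : List (Option String)) : List String :=
  quantities.filterMap (fun q => match q with
    | none => none
    | some s => if s = "" then none else some s)

def determine_consensus_quantity_py (quantities : List (Option String)) : String :=
  if quantities = [] then "Small"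
  else
    let valid_quantities := pvValid quantities
    if valid_quantities = [] then "Small"
    else
      let quantity_order : PySem.Dict String Int :=
        PySem.Dict.mk [("Small", 1), ("Medium", 2), ("Large", 3)]
      -- max(valid_quantities, key=lambda x: quantity_order.get(x, 1));
      -- the none branch is unreachable since valid_quantities ≠ []
      match PySem.List.max? valid_quantities (fun x => quantity_order.getD x 1) with
      | some m => m
      | none => "Small"

-- ===== PORT B =====
def determine_consensus_quantity_py_alt (quantities : List (Option String)) : String :=
  if quantities = [] then "Small"
  else
    let valid_quantities := pvValid quantities
    match valid_quantities with
    | [] => "Small"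
    | h :: _ =>
      if valid_quantities.contains "Large" then "Large"
      else if valid_quantities.contains "Medium" then "Medium"
      else h

-- ===== PRECONDITION & SPEC =====
def Spec_determine_consensus_quantity_py (quantities : List (Option String)) (out : String) : Prop := out = determine_consensus_quantity_py_alt quantities
instance (quantities : List (Option String)) (out : String) : Decidable (Spec_determine_consensus_quantity_py quantities out) := by unfold Spec_determine_consensus_quantity_py; infer_instance

-- ===== CLAIM (what is proved, stated in full; the proofs are below) =====
def Claim_equal_determine_consensus_quantity_py : Prop := ∀ (quantities : List (Option String)), Dom_determine_consensus_quantity_py quantities → Spec_determine_consensus_quantity_py quantities (determine_consensus_quantity_py quantities)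

-- ===== LEMMAS AND PROOFS =====

-- the if-chain A's priority key denotes
def pvK (s : String) : Int := if s = "Large" then 3 else if s = "Medium" then 2 else 1

theorem pvKey_eq (s : String) :
    (PySem.Dict.mk [("Small", (1:Int)), ("Medium", 2), ("Large", 3)]).getD s 1 = pvK s := by
  unfold pvK
  by_cases hL : s = "Large"
  · subst hL; decide
  · by_cases hM : s = "Medium"
    · subst hM; decide
    · by_cases hS : s = "Small"
      · subst hS; decide
      · simp [PySem.Dict.getD_eq_get?_getD, hL, hM,
          Ne.symm hL, Ne.symm hM, Ne.symm hS, PySem.Dict.get?]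

-- A's keyed max over a nonempty list is B's membership dispatch
set_option maxHeartbeats 1000000 in
theorem pvMax?_eq : ∀ (l : List String) (h : String),
    PySem.List.max? (h :: l) pvK
      = some (if "Large" ∈ (h :: l) then "Large"
              else if "Medium" ∈ (h :: l) then "Medium" else h) := by
  intro l
  induction l with
  | nil =>
      intro h
      by_cases hL : h = "Large" <;> by_cases hM : h = "Medium" <;>
        simp_all [PySem.List.max?, List.mem_cons, eq_comm]
  | cons x t ih =>
      intro h
      have step1 : PySem.List.max? (h :: x :: t) pvK
          = PySem.List.max? ((if pvK h < pvK x then x else h) :: t) pvK := by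
        simp only [PySem.List.max?, List.foldl_cons]
        split_ifs <;> simp
      rw [step1]
      split_ifs with hc <;> rw [ih] <;>
        by_cases hL : h = "Large" <;> by_cases xL : x = "Large" <;>
        by_cases hM : h = "Medium" <;> by_cases xM : x = "Medium" <;>
        simp_all [pvK, List.mem_cons, eq_comm]

-- ===== VERDICT (by name: the statement is the Claim_ definition above) =====
theorem determine_consensus_quantity_py_spec : Claim_equal_determine_consensus_quantity_py := by
  intro quantities _
  unfold Spec_determine_consensus_quantity_py determine_consensus_quantity_py determine_consensus_quantity_py_alt
  by_cases hq : quantities = []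
  · simp [hq]
  · simp only [hq, if_false]
    cases hv : pvValid quantities with
    | nil => simp
    | cons h t =>
        simp only
        have hk : (fun x => (PySem.Dict.mk [("Small", (1:Int)), ("Medium", 2), ("Large", 3)]).getD x 1)
            = pvK := funext pvKey_eq
        rw [hk, pvMax?_eq t h]
        simp
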